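-- pv_equiv track=rewrite | github.com/jcontini/agentos-community | skills/gmail/gmail.py | _domains_from_accounts
-- ===== SOURCE A (Python) =====
-- def _extract_domain(email_addr):
--     """Extract domain from an email address."""
--     if not email_addr or "@" not in email_addr:
--         return None
--     return email_addr.rsplit("@", 1)[1].lower()
--
-- def _domains_from_accounts(accounts):
--     """Extract unique domain objects from a list of parsed account dicts."""
--     seen = set()
--     domains = []
--     for acct in accounts:
--         domain = _extract_domain(acct.get("handle", ""))
--         if domain and domain not in seen:
--             seen.add(domain)
--             domains.append({"name": domain})
--     return domains
-- ===== SOURCE B (Python) =====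
-- def _extract_domain(email_addr):
--     """Extract domain from an email address."""
--     if not email_addr or "@" not in email_addr:
--         return None
--     return email_addr.rsplit("@", 1)[1].lower()
--
-- def _dedup_first(domains):
--     """Keep the first occurrence of each domain by recursively filtering out
--     later duplicates of the head; no auxiliary set is maintained."""
--     if not domains:
--         return []
--     head = domains[0]
--     return [head] + _dedup_first([d for d in domains[1:] if d != head])
--
-- def _domains_from_accounts(accounts):
--     """Extract unique domain objects: extract truthy domains, recursive
--     filter-based dedup, then wrap."""
--     domains = [d for a in accounts if (d := _extract_domain(a.get("handle", "")))]
--     return [{"name": d} for d in _dedup_first(domains)]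
-- ===== Notes on version B (the rewrite author's own statement) =====
-- stated objective: alternative
-- what changed: Replaces A's single loop with a mutable seen-set by a staged pipeline whose dedup is a recursive filter: keep the head domain and recurse on the tail with all its later duplicates filtered out, so no membership structure is kept at all.
import Mathlib
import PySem

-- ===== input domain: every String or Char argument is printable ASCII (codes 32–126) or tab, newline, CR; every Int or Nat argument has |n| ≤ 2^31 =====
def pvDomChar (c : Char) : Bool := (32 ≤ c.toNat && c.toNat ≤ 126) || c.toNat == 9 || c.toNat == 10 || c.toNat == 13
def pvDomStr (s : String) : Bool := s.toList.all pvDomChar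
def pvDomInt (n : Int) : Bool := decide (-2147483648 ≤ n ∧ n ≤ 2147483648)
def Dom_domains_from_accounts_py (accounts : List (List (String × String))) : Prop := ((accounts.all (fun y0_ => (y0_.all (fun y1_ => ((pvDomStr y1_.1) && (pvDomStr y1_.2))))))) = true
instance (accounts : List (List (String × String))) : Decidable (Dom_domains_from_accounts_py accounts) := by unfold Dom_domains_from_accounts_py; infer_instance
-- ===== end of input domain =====

-- B replaces A's seen-set loop by a staged pipeline whose dedup is a recursive head-keep/filter-tail pass (no membership structure); objective: alternative.


-- ===== PORT A =====
-- acct.get("handle", "") : first-match lookup in the insertion-ordered dict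
def pvHandleOf (acct : List (String × String)) : String :=
  PySem.Dict.getD (PySem.Dict.mk acct) "handle" ""

-- _extract_domain: rsplit("@", 1)[1] is ported by hand as the suffix after the
-- LAST '@' (exact here, since this branch is only reached when '@' occurs in s)
def pvExtractDomain (s : String) : Option String :=
  if s = "" ∨ ¬ PySem.Str.isIn "@" s then none
  else some (PySem.Str.lower (String.ofList ((s.toList.reverse.takeWhile (· ≠ '@')).reverse)))

def domains_from_accounts_py (accounts : List (List (String × String))) : List (List (String × String)) :=
  (accounts.foldl (fun st acct =>
      match pvExtractDomain (pvHandleOf acct) with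
      | some d =>
          if d ≠ "" ∧ st.1.contains d = false then (st.1.add d, st.2 ++ [[("name", d)]]) else st
      | none => st)
    ((PySem.Set.empty : PySem.Set String), ([] : List (List (String × String))))).2

-- ===== PORT B =====
-- the comprehension's filter: keep only truthy (non-None, non-empty) domains
def pvTruthyDomain (acct : List (String × String)) : Option String :=
  match pvExtractDomain (pvHandleOf acct) with
  | some d => if d = "" then none else some d
  | none => none

-- _dedup_first: keep the head, recurse on the tail with the head's duplicates filtered out
def pvDedupFirst : List String → List String
  | [] => []
  | d :: rest => d :: pvDedupFirst (rest.filter (fun x => x ≠ d))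
termination_by l => l.length
decreasing_by
  refine Nat.lt_succ_of_le ?_
  have h1 := List.length_filter_le (fun x : {x // x ∈ rest} => decide (↑x ≠ d)) rest.attach
  simpa using h1

def domains_from_accounts_py_alt (accounts : List (List (String × String))) : List (List (String × String)) :=
  let domains := accounts.filterMap pvTruthyDomain
  (pvDedupFirst domains).map (fun d => [("name", d)])

-- ===== PRECONDITION & SPEC =====
def Spec_domains_from_accounts_py (accounts : List (List (String × String))) (out : List (List (String × String))) : Prop := out = domains_from_accounts_py_alt accounts
instance (accounts : List (List (String × String))) (out : List (List (String × String))) : Decidable (Spec_domains_from_accounts_py accounts out) := by unfold Spec_domains_from_accounts_py; infer_instance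

-- ===== CLAIM (what is proved, stated in full; the proofs are below) =====
def Claim_equal_domains_from_accounts_py : Prop := ∀ (accounts : List (List (String × String))), Dom_domains_from_accounts_py accounts → Spec_domains_from_accounts_py accounts (domains_from_accounts_py accounts)

-- ===== LEMMAS AND PROOFS =====

theorem pvDedupFirst_cons (d : String) (rest : List String) :
    pvDedupFirst (d :: rest) = d :: pvDedupFirst (rest.filter (fun x => x ≠ d)) := by
  conv_lhs => rw [pvDedupFirst.eq_def]

-- A's fold over accounts equals a pure dedup fold over the extracted truthy domains
theorem pv_fold_filterMap (accounts : List (List (String × String)))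
    (st : PySem.Set String × List (List (String × String))) :
    accounts.foldl (fun st acct =>
      match pvExtractDomain (pvHandleOf acct) with
      | some d =>
          if d ≠ "" ∧ st.1.contains d = false then (st.1.add d, st.2 ++ [[("name", d)]]) else st
      | none => st) st
    = (accounts.filterMap pvTruthyDomain).foldl (fun st d =>
        if st.1.contains d = false then (st.1.add d, st.2 ++ [[("name", d)]]) else st) st := by
  induction accounts generalizing st with
  | nil => rfl
  | cons a rest ih =>
    simp only [List.foldl_cons, List.filterMap_cons]
    cases hx : pvExtractDomain (pvHandleOf a) with
    | none => simp only [pvTruthyDomain, hx]; exact ih st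
    | some d =>
      by_cases hd : d = ""
      · subst hd
        simp only [pvTruthyDomain, hx, ne_eq, not_true_eq_false, false_and, if_false]
        simp only [reduceIte]
        exact ih st
      · simp only [pvTruthyDomain, hx, ne_eq, hd, not_false_eq_true, true_and, 
          ]
        exact ih _

-- loop invariant: the seen-set dedup fold equals the recursive filter-based dedup
theorem pv_dedup_inv (n : Nat) (ds : List String) (hn : ds.length ≤ n)
    (l : List String) (acc : List (List (String × String))) :
    (ds.foldl (fun st d =>
        if st.1.contains d = false then (st.1.add d, st.2 ++ [[("name", d)]]) else st)
      ((PySem.Set.ofList l : PySem.Set String), acc)).2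
    = acc ++ (pvDedupFirst (ds.filter (fun x => !(l.contains x)))).map (fun d => [("name", d)]) := by
  induction n generalizing ds l acc with
  | zero =>
    have : ds = [] := List.length_eq_zero_iff.mp (Nat.le_zero.mp hn)
    subst this
    simp [pvDedupFirst]
  | succ n ih =>
    cases ds with
    | nil => simp [pvDedupFirst]
    | cons d rest =>
      have hrest : rest.length ≤ n := Nat.le_of_succ_le_succ hn
      simp only [List.foldl_cons, List.filter_cons]
      have hcont : (PySem.Set.ofList l).contains d = l.contains d := by
        simp [PySem.Set.contains_eq_listContains, PySem.Set.mem_ofList]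
      by_cases hm : l.contains d = true
      · rw [hcont, hm, if_neg (by simp)]
        simp only [Bool.not_true, Bool.false_eq_true, if_false]
        exact ih rest hrest l acc
      · have hm' : l.contains d = false := by simpa using hm
        rw [hcont, hm', if_pos rfl]
        simp only [Bool.not_false, reduceIte]
        have hadd : (PySem.Set.ofList l).add d = PySem.Set.ofList (l ++ [d]) := by
          simp [PySem.Set.ofList_eq_foldl, List.foldl_append]
        rw [hadd, pvDedupFirst_cons]
        have hfe : (rest.filter (fun x => !(l.contains x))).filter (fun x => x ≠ d)
            = rest.filter (fun x => !((l ++ [d]).contains x)) := by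
          rw [List.filter_filter]
          apply List.filter_congr
          intro x _
          simp only [List.contains_append, List.contains_cons, List.contains_nil,
            Bool.or_false, Bool.not_or, decide_not]
          rw [Bool.and_comm]
          rfl
        rw [hfe]
        have := ih rest hrest (l ++ [d]) (acc ++ [[("name", d)]])
        rw [this]
        simp

-- ===== VERDICT (by name: the statement is the Claim_ definition above) =====
theorem domains_from_accounts_py_spec : Claim_equal_domains_from_accounts_py := by
  intro accounts _
  unfold Spec_domains_from_accounts_py domains_from_accounts_py domains_from_accounts_py_alt
  rw [pv_fold_filterMap]
  have h := pv_dedup_inv (accounts.filterMap pvTruthyDomain).length _ le_rfl [] []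
  simpa using h
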